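-- pv_equiv track=rewrite | github.com/mmartinezLLM/Arriendo-Datas-Sets | property_crawler_robust.py | _extraer_imagenes
-- ===== SOURCE A (Python) =====
-- from typing import Dict, List, Optional, Any, Set
--
-- def _extraer_imagenes(data: Dict) -> List[str]:
--     imagenes = []
--     urls_vistas = set()
--     images = data.get('images', [])
--     for img in images:
--         if isinstance(img, dict):
--             url = img.get('image')
--             if url and url not in urls_vistas:
--                 urls_vistas.add(url)
--                 imagenes.append(url)
--         elif isinstance(img, str):
--             if img not in urls_vistas:
--                 urls_vistas.add(img)
--                 imagenes.append(img)
--     if not imagenes: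
--         img_principal = data.get('img')
--         if img_principal:
--             imagenes.append(img_principal)
--     return imagenes
-- ===== SOURCE B (Python) =====
-- def _extraer_imagenes(data):
--     # Pass 1: flatten candidate URLs; pass 2: dedup by repeated head-selection + filter (no seen-set).
--     candidates = []
--     for img in data.get('images', []):
--         if isinstance(img, dict):
--             url = img.get('image')
--             if url:
--                 candidates.append(url)
--         elif isinstance(img, str):
--             candidates.append(img)
--     imagenes = []
--     rest = candidates
--     while rest:
--         head = rest[0]
--         imagenes.append(head)
--         rest = [x for x in rest[1:] if x != head]
--     if not imagenes:
--         img_principal = data.get('img')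
--         if img_principal:
--             imagenes.append(img_principal)
--     return imagenes
-- ===== Notes on version B (the rewrite author's own statement) =====
-- stated objective: alternative
-- what changed: B first flattens the candidate URLs and then deduplicates with a selection loop that takes the head and filters all its later duplicates out of the remainder, instead of A's single extraction pass threading a hash seen-set alongside the output.
-- outside the precondition, e.g. on _extraer_imagenes({'img': [{'a': 'b'}]}): A returns [[{'a': 'b'}]], B returns [[{'a': 'b'}]]
import Mathlib
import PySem

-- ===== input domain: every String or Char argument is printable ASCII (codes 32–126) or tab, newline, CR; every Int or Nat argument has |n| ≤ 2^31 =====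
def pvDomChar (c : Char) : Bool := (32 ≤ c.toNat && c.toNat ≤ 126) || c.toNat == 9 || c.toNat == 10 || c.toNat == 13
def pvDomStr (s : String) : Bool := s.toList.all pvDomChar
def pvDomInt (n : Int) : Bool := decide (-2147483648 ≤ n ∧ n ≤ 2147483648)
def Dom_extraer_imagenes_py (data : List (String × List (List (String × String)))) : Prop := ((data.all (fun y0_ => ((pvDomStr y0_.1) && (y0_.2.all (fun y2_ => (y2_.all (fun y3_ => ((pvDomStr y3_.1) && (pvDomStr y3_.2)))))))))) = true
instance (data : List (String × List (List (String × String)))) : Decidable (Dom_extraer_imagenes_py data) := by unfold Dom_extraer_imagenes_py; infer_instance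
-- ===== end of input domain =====

-- B flattens the candidate URLs and then deduplicates by repeated head-selection + filtering,
-- instead of A's single pass with a seen-set; equivalence is about the RETURN value on Pre_.

-- shared helper: img.get('image') on an image dict
def pvImgGet (img : List (String × String)) : Option String :=
  PySem.Dict.get? (PySem.Dict.mk img) "image"

-- ===== PORT A =====
-- state is (imagenes, urls_vistas); the 'elif isinstance(img, str)' branch is unreachable under the
-- typed model (every img is a dict).  The final fallback 'imagenes.append(data.get("img"))' would
-- append a value that is not a str; Pre_ excludes exactly the inputs on which it fires.
def extraer_imagenes_py (data : List (String × List (List (String × String)))) : List String :=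
  let images := PySem.Dict.getD (PySem.Dict.mk data) "images" []
  let st := images.foldl
    (fun (st : List String × PySem.Set String) img =>
      match pvImgGet img with
      | some url =>
          if url ≠ "" then
            if PySem.Set.contains st.2 url then st
            else (st.1 ++ [url], PySem.Set.add st.2 url)
          else st
      | none => st)
    ([], PySem.Set.empty)
  st.1

-- ===== PORT B =====
-- pass 1 flattens candidates; the while loop becomes the obvious tail recursion, filtering the
-- head's duplicates out of the remainder; Pre_ likewise excludes the non-str fallback append.
def pvDedupLoop (imagenes : List String) (rest : List String) : List String :=
  match rest with
  | [] => imagenes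
  | head :: t => pvDedupLoop (imagenes ++ [head]) (t.filter (fun x => x ≠ head))
termination_by rest.length
decreasing_by
  simp only [List.length_unattach]
  exact Nat.lt_succ_of_le (le_trans (List.length_filter_le _ _) (by simp))

def extraer_imagenes_py_alt (data : List (String × List (List (String × String)))) : List String :=
  let images := PySem.Dict.getD (PySem.Dict.mk data) "images" []
  let candidates := images.foldl
    (fun (acc : List String) img =>
      match pvImgGet img with
      | some url => if url ≠ "" then acc ++ [url] else acc
      | none => acc)
    []
  pvDedupLoop [] candidates

-- ===== PRECONDITION & SPEC =====
-- Pre_ excludes the inputs where the collected list is empty and data['img'] is a truthy (non-empty)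
-- value: there Python A (and B) append data.get('img'), a list of dicts, so the returned list is not
-- a list of str and has no value of the declared return type List String.
def Pre_extraer_imagenes_py (data : List (String × List (List (String × String)))) : Prop :=
  ((PySem.Dict.getD (PySem.Dict.mk data) "images" []).any
      (fun img => match pvImgGet img with | some u => u ≠ "" | none => false)) = true
  ∨ PySem.Dict.get? (PySem.Dict.mk data) "img" = none
  ∨ PySem.Dict.get? (PySem.Dict.mk data) "img" = some []
instance (data : List (String × List (List (String × String)))) : Decidable (Pre_extraer_imagenes_py data) := by unfold Pre_extraer_imagenes_py; infer_instance

def pvWitness_extraer_imagenes_py : (List (String × List (List (String × String)))) :=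
  [("images", [[("image", "http://a/1.jpg")], [("image", "http://a/1.jpg")], [("image", "")]])]

def Spec_extraer_imagenes_py (data : List (String × List (List (String × String)))) (out : List String) : Prop := out = extraer_imagenes_py_alt data
instance (data : List (String × List (List (String × String)))) (out : List String) : Decidable (Spec_extraer_imagenes_py data out) := by unfold Spec_extraer_imagenes_py; infer_instance

-- ===== CLAIM (what is proved, stated in full; the proofs are below) =====
def Claim_equal_extraer_imagenes_py : Prop := ∀ (data : List (String × List (List (String × String)))), Dom_extraer_imagenes_py data → Pre_extraer_imagenes_py data → Spec_extraer_imagenes_py data (extraer_imagenes_py data)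

-- ===== LEMMAS AND PROOFS =====

-- proof-only names for the loop bodies (definitionally equal to the ports' lambdas)
def pvAStep (st : List String × PySem.Set String) (img : List (String × String)) :
    List String × PySem.Set String :=
  match pvImgGet img with
  | some url =>
      if url ≠ "" then
        if PySem.Set.contains st.2 url then st
        else (st.1 ++ [url], PySem.Set.add st.2 url)
      else st
  | none => st

def pvBStep (acc : List String) (img : List (String × String)) : List String :=
  match pvImgGet img with
  | some url => if url ≠ "" then acc ++ [url] else acc
  | none => acc

def pvSStep (s : PySem.Set String) (img : List (String × String)) : PySem.Set String :=
  match pvImgGet img with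
  | some url => if url ≠ "" then PySem.Set.add s url else s
  | none => s

lemma pvAStep_diag (acc : List String) (img : List (String × String)) :
    pvAStep (acc, acc) img = (pvSStep acc img, pvSStep acc img) := by
  unfold pvAStep pvSStep PySem.Set.add
  rcases hp : pvImgGet img with _ | url <;> simp only []; split_ifs <;> rfl

lemma pvBStep_fold (acc : List String) (img : List (String × String)) (s : PySem.Set String) :
    List.foldl PySem.Set.add s (pvBStep acc img)
      = pvSStep (List.foldl PySem.Set.add s acc) img := by
  unfold pvBStep pvSStep
  rcases hp : pvImgGet img with _ | url <;> simp only []; split_ifs <;>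
    simp [List.foldl_append]

-- A's loop keeps urls_vistas equal (as a list) to imagenes, so on the diagonal it is a Set.add fold.
lemma aloop_diag (images : List (List (String × String))) :
    ∀ acc : List String,
      (images.foldl pvAStep (acc, acc)).1 = images.foldl pvSStep acc := by
  induction images with
  | nil => intro acc; rfl
  | cons img rest ih =>
      intro acc
      simp only [List.foldl_cons, pvAStep_diag]
      exact ih _

-- B's collected candidates folded through Set.add equal A's filtered Set.add fold.
lemma bcand_fold (images : List (List (String × String))) :
    ∀ (acc : List String) (s : PySem.Set String),
      (images.foldl pvBStep acc).foldl PySem.Set.add s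
        = images.foldl pvSStep (acc.foldl PySem.Set.add s) := by
  induction images with
  | nil => intro acc s; rfl
  | cons img rest ih =>
      intro acc s
      simp only [List.foldl_cons]
      rw [ih, pvBStep_fold]

-- elements already in the set are skipped by the Set.add fold, so filtering them out is neutral
lemma foldl_add_filter (h : String) (t : List String) (s : PySem.Set String)
    (hs : PySem.Set.contains s h = true) :
    List.foldl PySem.Set.add s (t.filter (fun x => x ≠ h))
      = List.foldl PySem.Set.add s t := by
  induction t generalizing s with
  | nil => rfl
  | cons x t ih =>
      rcases eq_or_ne x h with hx | hx
      · subst hx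
        have hmem : x ∈ s := (PySem.Set.contains_iff _ _).mp hs
        rw [List.filter_cons, if_neg (by simp), List.foldl_cons,
          show PySem.Set.add s x = s from by simp [PySem.Set.add, hmem]]
        exact ih s hs
      · have hs' : PySem.Set.contains (PySem.Set.add s x) h = true :=
          (PySem.Set.contains_iff _ _).mpr
            ((PySem.Set.mem_add _ _ _).mpr (Or.inl ((PySem.Set.contains_iff _ _).mp hs)))
        rw [List.filter_cons, if_pos (by simpa using hx), List.foldl_cons, List.foldl_cons]
        exact ih _ hs'

-- B's selection-filter dedup loop computes the Set.add fold whenever rest avoids imagenes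
lemma dedupLoop_eq_aux (n : Nat) :
    ∀ rest : List String, rest.length ≤ n →
    ∀ imagenes : List String, (∀ x ∈ rest, x ∉ imagenes) →
      pvDedupLoop imagenes rest = List.foldl PySem.Set.add imagenes rest := by
  induction n with
  | zero =>
      intro rest hlen imagenes _
      have : rest = [] := List.eq_nil_of_length_eq_zero (Nat.le_zero.mp hlen)
      subst this; rw [pvDedupLoop]; rfl
  | succ n ih =>
      intro rest hlen imagenes hdisj
      cases rest with
      | nil => rw [pvDedupLoop]; rfl
      | cons head t =>
          have hh : head ∉ imagenes := hdisj head (by simp)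
          have hadd : PySem.Set.add imagenes head = imagenes ++ [head] := by
            simp [PySem.Set.add, hh]
          have hcont : PySem.Set.contains (imagenes ++ [head]) head = true :=
            (PySem.Set.contains_iff _ _).mpr (by simp)
          have hlen' : (t.filter (fun x => x ≠ head)).length ≤ n :=
            le_trans (List.length_filter_le _ _) (Nat.lt_succ_iff.mp (by simpa using hlen))
          rw [pvDedupLoop, List.foldl_cons, hadd, ← foldl_add_filter head t _ hcont]
          refine ih _ hlen' (imagenes ++ [head]) ?_
          intro x hx
          have hxt := List.mem_filter.mp hx
          have hxne : x ≠ head := by simpa using hxt.2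
          have := hdisj x (List.mem_cons_of_mem _ hxt.1)
          simp [hxne, this]

lemma dedupLoop_eq (rest : List String) (imagenes : List String)
    (hdisj : ∀ x ∈ rest, x ∉ imagenes) :
    pvDedupLoop imagenes rest = List.foldl PySem.Set.add imagenes rest :=
  dedupLoop_eq_aux rest.length rest le_rfl imagenes hdisj

-- ===== VERDICT (by name: the statement is the Claim_ definition above) =====
theorem extraer_imagenes_py_spec : Claim_equal_extraer_imagenes_py := by
  intro data _ _
  show extraer_imagenes_py data = extraer_imagenes_py_alt data
  unfold extraer_imagenes_py extraer_imagenes_py_alt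
  rw [dedupLoop_eq _ _ (by simp)]
  show (List.foldl pvAStep ([], []) _).1 = List.foldl PySem.Set.add [] (List.foldl pvBStep [] _)
  rw [bcand_fold]
  exact aloop_diag _ []
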